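-- pv_equiv track=rewrite | github.com/CognitiveScale/cortex-python | cortex_common/utils/time_utils.py | fold_start_and_stop_time_tuples_into_dict
-- ===== SOURCE A (Python) =====
-- from typing import Any, Mapping, Iterable, Tuple, Dict
--
-- def fold_start_and_stop_time_tuples_into_dict(
--     startTime_stopTime_tuples: Iterable[Tuple],
-- ) -> Dict:
--     """
--     Helper to figure out max overlapping start and stop times ...
--     >>> [
--     >>>     ("2019-01-01T00:00:00Z", "2019-01-01T01:00:00Z"), ("2019-01-01T00:00:00Z", "2019-01-02T02:00:00Z")
--     >>> ]
--     >>> # into ...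
--     >>> { "2019-01-01T00:00:00Z": "2019-01-02T02:00:00Z"}
--
--     :param startTime_stopTime_tuples:
--     :return:
--     """  # pylint: disable=line-too-long
--     d: Dict = {}
--     for start_time, stop_time in startTime_stopTime_tuples:
--         if start_time in d:
--             # Take the newer stop time ...
--             if stop_time > d[start_time]:
--                 d[start_time] = stop_time
--         else:
--             d[start_time] = stop_time
--     return d
-- ===== SOURCE B (Python) =====
-- def fold_start_and_stop_time_tuples_into_dict(startTime_stopTime_tuples):
--     # Pass 1: group every stop time under its start time, in order of appearance.
--     groups = {}
--     for start_time, stop_time in startTime_stopTime_tuples: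
--         groups.setdefault(start_time, []).append(stop_time)
--     # Pass 2: reduce each group to its maximum stop time.
--     return {start: max(stops) for start, stops in groups.items()}
-- ===== Notes on version B (the rewrite author's own statement) =====
-- stated objective: alternative
-- what changed: Replaces A's single loop with inline max-tracking by a two-phase pipeline: a first pass groups all stop times per start time into lists, then a comprehension reduces each group with max; insertion order of keys is preserved by the grouping dict.
import Mathlib
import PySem

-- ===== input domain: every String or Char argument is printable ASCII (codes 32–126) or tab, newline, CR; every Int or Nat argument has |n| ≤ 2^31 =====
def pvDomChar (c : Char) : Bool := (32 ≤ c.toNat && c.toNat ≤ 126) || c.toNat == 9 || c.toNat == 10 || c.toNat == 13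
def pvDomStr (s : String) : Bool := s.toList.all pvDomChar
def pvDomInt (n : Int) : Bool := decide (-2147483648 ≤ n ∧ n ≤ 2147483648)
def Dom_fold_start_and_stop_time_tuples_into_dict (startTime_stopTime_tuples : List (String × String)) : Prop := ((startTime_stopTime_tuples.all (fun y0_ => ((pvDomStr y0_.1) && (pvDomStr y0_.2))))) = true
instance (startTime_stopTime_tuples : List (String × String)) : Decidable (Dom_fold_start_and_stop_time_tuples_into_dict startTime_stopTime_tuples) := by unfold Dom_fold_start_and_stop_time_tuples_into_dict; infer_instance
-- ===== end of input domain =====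

-- B replaces A's single loop with inline max-tracking by a two-phase pipeline (group all
-- stop times per start, then reduce each group with max); same cost, different decomposition.

-- ===== PORT A =====
def fold_start_and_stop_time_tuples_into_dict (startTime_stopTime_tuples : List (String × String)) : List (String × String) :=
  (startTime_stopTime_tuples.foldl
    (fun d p =>
      if d.contains p.1 then
        -- 'stop_time > d[start_time]': d[p.1] exists here, so getD reads exactly it
        if d.getD p.1 "" < p.2 then d.insert p.1 p.2 else d
      else d.insert p.1 p.2)
    PySem.Dict.empty).items

-- ===== PORT B =====
-- max(stops): each stops list is nonempty (one list per key seen), so the getD "" default is never read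
def pyMaxStr (l : List String) : String := (PySem.List.max? l (fun x => x)).getD ""

def fold_start_and_stop_time_tuples_into_dict_alt (startTime_stopTime_tuples : List (String × String)) : List (String × String) :=
  -- pass 1: groups.setdefault(start, []).append(stop)
  let groups := startTime_stopTime_tuples.foldl
    (fun g p => g.modify p.1 [] (fun l => l ++ [p.2])) PySem.Dict.empty
  -- pass 2: {start: max(stops) for start, stops in groups.items()}
  groups.items.map (fun p => (p.1, pyMaxStr p.2))

-- ===== PRECONDITION & SPEC =====
def Spec_fold_start_and_stop_time_tuples_into_dict (startTime_stopTime_tuples : List (String × String)) (out : List (String × String)) : Prop := out = fold_start_and_stop_time_tuples_into_dict_alt startTime_stopTime_tuples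
instance (startTime_stopTime_tuples : List (String × String)) (out : List (String × String)) : Decidable (Spec_fold_start_and_stop_time_tuples_into_dict startTime_stopTime_tuples out) := by unfold Spec_fold_start_and_stop_time_tuples_into_dict; infer_instance

-- ===== CLAIM (what is proved, stated in full; the proofs are below) =====
def Claim_equal_fold_start_and_stop_time_tuples_into_dict : Prop := ∀ (startTime_stopTime_tuples : List (String × String)), Dom_fold_start_and_stop_time_tuples_into_dict startTime_stopTime_tuples → Spec_fold_start_and_stop_time_tuples_into_dict startTime_stopTime_tuples (fold_start_and_stop_time_tuples_into_dict startTime_stopTime_tuples)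

-- ===== LEMMAS AND PROOFS =====

lemma max?_append_singleton (l : List String) (t m : String)
    (hm : PySem.List.max? l (fun x => x) = some m) :
    PySem.List.max? (l ++ [t]) (fun x => x) = some (if m < t then t else m) := by
  unfold PySem.List.max? at hm ⊢
  rw [List.foldl_append, hm]
  by_cases hlt : m < t <;>
    simp only [List.foldl_cons, List.foldl_nil, hlt, if_pos, ite_false]

lemma max?_some (l : List String) (h : l ≠ []) :
    ∃ m, PySem.List.max? l (fun x => x) = some m := by
  induction l using List.reverseRecOn with
  | nil => exact absurd rfl h
  | append_singleton ys t ih =>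
    rcases eq_or_ne ys [] with h0 | h0
    · subst h0; exact ⟨t, rfl⟩
    · obtain ⟨m, hm⟩ := ih h0
      exact ⟨_, max?_append_singleton ys t m hm⟩

lemma fold_inv (ts : List (String × String)) :
    ∀ (d : PySem.Dict String String) (g : PySem.Dict String (List String)),
    g.keys.Nodup →
    (∀ p ∈ g.items, p.2 ≠ []) →
    d.items = g.items.map (fun p => (p.1, pyMaxStr p.2)) →
    (ts.foldl
      (fun d p =>
        if d.contains p.1 then
          if d.getD p.1 "" < p.2 then d.insert p.1 p.2 else d
        else d.insert p.1 p.2) d).items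
      = ((ts.foldl (fun g p => g.modify p.1 [] (fun l => l ++ [p.2])) g).items).map
          (fun p => (p.1, pyMaxStr p.2)) := by
  induction ts with
  | nil => intro d g _ _ hitems; simpa using hitems
  | cons st ts ih =>
    intro d g hnd hne hitems
    obtain ⟨s, t⟩ := st
    simp only [List.foldl_cons]
    have hkeys : d.keys = g.keys := by
      simp [PySem.Dict.keys, hitems, List.map_map, Function.comp]
    have hdnd : d.keys.Nodup := hkeys ▸ hnd
    have hc : d.contains s = g.contains s := by
      simp [PySem.Dict.contains, hitems, List.any_map, Function.comp_def]
    have hgmod : g.modify s [] (fun l => l ++ [t]) = g.insert s (g.getD s [] ++ [t]) := rfl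
    by_cases hcon : g.contains s = true
    · -- key already present in the group dict
      obtain ⟨v, hv⟩ : ∃ v, g.get? s = some v := by
        have := PySem.Dict.contains_eq_isSome_get? g s
        rw [hcon] at this
        exact Option.isSome_iff_exists.mp this.symm
      have hvl : g.getD s [] = v := PySem.Dict.getD_of_get?_eq_some g [] hv
      have hmemg : (s, v) ∈ g.items := (PySem.Dict.get?_eq_some_iff_mem_items g s v hnd).mp hv
      have hvne : v ≠ [] := hne _ hmemg
      obtain ⟨m, hm⟩ := max?_some v hvne
      have hpy : pyMaxStr v = m := by simp [pyMaxStr, hm]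
      have hmemd : (s, m) ∈ d.items := by
        rw [hitems]
        exact List.mem_map.mpr ⟨(s, v), hmemg, by simp [hpy]⟩
      have hgd : d.getD s "" = m := PySem.Dict.getD_of_mem_items d hmemd hdnd ""
      have hpy2 : pyMaxStr (v ++ [t]) = if m < t then t else m := by
        simp [pyMaxStr, max?_append_singleton v t m hm]
      have hdc : d.contains s = true := hc.trans hcon
      -- the new group dict
      rw [hgmod, hvl]
      have hnd' : (g.insert s (v ++ [t])).keys.Nodup :=
        PySem.Dict.nodup_keys_insert g s (v ++ [t]) hnd
      have hne' : ∀ p ∈ (g.insert s (v ++ [t])).items, p.2 ≠ [] := by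
        intro p hp
        rcases (PySem.Dict.mem_items_insert g s (v ++ [t]) p).mp hp with h1 | ⟨h2, _⟩
        · subst h1; simp
        · exact hne _ h2
      have hitemsB : (g.insert s (v ++ [t])).items
          = g.items.map (fun p => if p.1 == s then (s, v ++ [t]) else p) :=
        PySem.Dict.items_insert_of_contains g (v ++ [t]) hcon
      rw [hdc, if_pos rfl, hgd]
      by_cases hlt : m < t
      · rw [if_pos hlt]
        apply ih _ _ hnd' hne'
        rw [PySem.Dict.items_insert_of_contains d t hdc, hitemsB, hitems,
            List.map_map, List.map_map]
        apply List.map_congr_left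
        intro p _
        by_cases hps : p.1 = s
        · simp [Function.comp, hps, hpy2, hlt]
        · simp [Function.comp, hps]
      · rw [if_neg hlt]
        apply ih _ _ hnd' hne'
        rw [hitemsB, hitems, List.map_map]
        apply List.map_congr_left
        intro p hp
        obtain ⟨p1, p2⟩ := p
        by_cases hps : p1 = s
        · subst hps
          have : g.get? p1 = some p2 := (PySem.Dict.get?_eq_some_iff_mem_items g p1 p2 hnd).mpr hp
          have hpv : p2 = v := by rw [this] at hv; exact (Option.some.injEq _ _).mp hv
          subst hpv
          simp [Function.comp, hpy2, hlt, hpy]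
        · simp [Function.comp, hps]
    · -- new key
      have hcon' : g.contains s = false := by simpa using hcon
      have hdc : d.contains s = false := hc.trans hcon'
      have hvl : g.getD s [] = [] := PySem.Dict.getD_of_not_contains g [] hcon'
      rw [hgmod, hvl, hdc]
      simp only [Bool.false_eq_true, if_false]
      have hnd' : (g.insert s ([] ++ [t])).keys.Nodup :=
        PySem.Dict.nodup_keys_insert g s _ hnd
      have hne' : ∀ p ∈ (g.insert s ([] ++ [t])).items, p.2 ≠ [] := by
        intro p hp
        rcases (PySem.Dict.mem_items_insert g s _ p).mp hp with h1 | ⟨h2, _⟩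
        · subst h1; simp
        · exact hne _ h2
      apply ih _ _ hnd' hne'
      rw [PySem.Dict.items_insert_of_not_contains d t hdc,
          PySem.Dict.items_insert_of_not_contains g ([] ++ [t]) hcon', hitems]
      simp [pyMaxStr, PySem.List.max?]

-- ===== VERDICT (by name: the statement is the Claim_ definition above) =====
theorem fold_start_and_stop_time_tuples_into_dict_spec : Claim_equal_fold_start_and_stop_time_tuples_into_dict := by
  intro ts _
  unfold Spec_fold_start_and_stop_time_tuples_into_dict
  unfold fold_start_and_stop_time_tuples_into_dict fold_start_and_stop_time_tuples_into_dict_alt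
  exact fold_inv ts PySem.Dict.empty PySem.Dict.empty
    (by simp [PySem.Dict.keys, PySem.Dict.empty])
    (by simp [PySem.Dict.empty])
    (by simp [PySem.Dict.empty])
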